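-- pv_equiv track=rewrite | github.com/xorkevin/advent2015 | advent3.py | doubleParseLocation
-- ===== SOURCE A (Python) =====
-- moveKey = {
--     '^': (0,1),
--     '>': (1,0),
--     'v': (0,-1),
--     '<': (-1,0),
--     }
--
-- def doubleParseLocation(directions):
--     xp = 0
--     yp = 0
--     xq = 0
--     yq = 0
--     locSet = set([(xp, yp)])
--     first = True
--
--     for move in directions:
--         dx, dy = moveKey[move]
--         if first:
--             first = False
--             xp += dx
--             yp += dy
--             locSet.add((xp, yp))
--         else:
--             first = True
--             xq += dx
--             yq += dy
--             locSet.add((xq, yq))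
--
--     return len(locSet)
-- ===== SOURCE B (Python) =====
-- moveKey = {
--     '^': (0,1),
--     '>': (1,0),
--     'v': (0,-1),
--     '<': (-1,0),
--     }
--
-- def doubleParseLocation(directions):
--     def visited(moves):
--         x, y = 0, 0
--         locs = {(0, 0)}
--         for m in moves:
--             dx, dy = moveKey[m]
--             x += dx
--             y += dy
--             locs.add((x, y))
--         return locs
--     return len(visited(directions[0::2]) | visited(directions[1::2]))
-- ===== Notes on version B (the rewrite author's own statement) =====
-- stated objective: alternative
-- what changed: Replaces the single interleaved loop that alternates between two agents via a boolean toggle and four scattered coordinate variables by partitioning the input up front into the two agents' move streams (directions[0::2] and directions[1::2]), walking each independently with one shared helper, and returning the size of the union of the two visited sets.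
import Mathlib
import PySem

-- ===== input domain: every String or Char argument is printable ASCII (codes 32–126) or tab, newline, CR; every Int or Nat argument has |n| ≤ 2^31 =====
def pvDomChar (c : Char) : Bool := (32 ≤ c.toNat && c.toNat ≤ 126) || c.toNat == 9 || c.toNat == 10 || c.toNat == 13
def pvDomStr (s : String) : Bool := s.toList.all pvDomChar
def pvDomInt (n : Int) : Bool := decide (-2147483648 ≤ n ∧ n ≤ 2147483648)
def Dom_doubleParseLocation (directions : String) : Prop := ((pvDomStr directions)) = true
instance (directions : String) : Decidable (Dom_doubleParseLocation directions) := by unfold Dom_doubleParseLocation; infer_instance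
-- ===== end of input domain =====

-- B partitions the input into the two agents' move streams up front and walks each
-- independently with one shared helper, instead of A's interleaved loop with a boolean toggle.

-- ===== PORT A =====
-- module-level constant of Source A (shared by Source B)
def moveKey : PySem.Dict Char (Int × Int) :=
  PySem.Dict.ofList [('^', (0, 1)), ('>', (1, 0)), ('v', (0, -1)), ('<', (-1, 0))]

-- loop body of A; state = ((xp, yp), (xq, yq), locSet, first).
-- moveKey[move] on a key not present raises KeyError in Python: excluded by Pre_; getD totalizes.
def stepA (s : (Int × Int) × (Int × Int) × PySem.Set (Int × Int) × Bool) (move : Char) :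
    (Int × Int) × (Int × Int) × PySem.Set (Int × Int) × Bool :=
  let d := (moveKey.get? move).getD (0, 0)
  if s.2.2.2 then
    ((s.1.1 + d.1, s.1.2 + d.2), s.2.1, PySem.Set.add s.2.2.1 (s.1.1 + d.1, s.1.2 + d.2), false)
  else
    (s.1, (s.2.1.1 + d.1, s.2.1.2 + d.2), PySem.Set.add s.2.2.1 (s.2.1.1 + d.1, s.2.1.2 + d.2), true)

def doubleParseLocation (directions : String) : Int :=
  let st := directions.toList.foldl stepA
    (((0, 0), (0, 0), PySem.Set.ofList [((0 : Int), (0 : Int))], true))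
  (PySem.Set.len st.2.2.1 : Int)

-- ===== PORT B =====
-- loop body of B's helper 'visited'; state = ((x, y), locs)
def stepB (st : (Int × Int) × PySem.Set (Int × Int)) (m : Char) :
    (Int × Int) × PySem.Set (Int × Int) :=
  let d := (moveKey.get? m).getD (0, 0)
  let p := (st.1.1 + d.1, st.1.2 + d.2)
  (p, PySem.Set.add st.2 p)

def visitedB (moves : List Char) : PySem.Set (Int × Int) :=
  (moves.foldl stepB ((0, 0), PySem.Set.ofList [((0 : Int), (0 : Int))])).2

def doubleParseLocation_alt (directions : String) : Int :=
  let santa := (PySem.List.slice? directions.toList (some 0) none 2).getD []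
  let robo := (PySem.List.slice? directions.toList (some 1) none 2).getD []
  (PySem.Set.len (PySem.Set.union (visitedB santa) (visitedB robo)) : Int)

-- ===== PRECONDITION & SPEC =====
-- Pre_ excludes exactly the inputs where Python A raises KeyError: a character not in moveKey.
def Pre_doubleParseLocation (directions : String) : Prop :=
  directions.toList.all (fun c => moveKey.contains c) = true
instance (directions : String) : Decidable (Pre_doubleParseLocation directions) := by
  unfold Pre_doubleParseLocation; infer_instance

def pvWitness_doubleParseLocation : String := "^>v<>"

def Spec_doubleParseLocation (directions : String) (out : Int) : Prop := out = doubleParseLocation_alt directions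
instance (directions : String) (out : Int) : Decidable (Spec_doubleParseLocation directions out) := by unfold Spec_doubleParseLocation; infer_instance

-- ===== CLAIM (what is proved, stated in full; the proofs are below) =====
def Claim_equal_doubleParseLocation : Prop := ∀ (directions : String), Dom_doubleParseLocation directions → Pre_doubleParseLocation directions → Spec_doubleParseLocation directions (doubleParseLocation directions)

-- ===== LEMMAS AND PROOFS =====

-- the even-indexed elements of a list (what xs[0::2] selects)
def pvEvens {α : Type} : List α → List α
  | [] => []
  | [a] => [a]
  | a :: _ :: t => a :: pvEvens t

theorem pvEvens_cons {α : Type} (c : α) (t : List α) :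
    pvEvens (c :: t) = c :: pvEvens t.tail := by
  cases t <;> rfl

theorem pvFilterMap_range_evens {α : Type} (l : List α) :
    (List.range ((l.length + 1) / 2)).filterMap (fun k => l[2 * k]?) = pvEvens l := by
  induction l using pvEvens.induct with
  | case1 => simp [pvEvens]
  | case2 a => simp [pvEvens, List.range_one]
  | case3 a b t ih =>
    have hc : ((a :: b :: t).length + 1) / 2 = (t.length + 1) / 2 + 1 := by
      simp only [List.length_cons]; omega
    rw [hc, List.range_succ_eq_map, List.filterMap_cons, List.filterMap_map]
    have h2 : (fun k => (a :: b :: t)[2 * k]?) ∘ Nat.succ = (fun k : Nat => t[2 * k]?) := by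
      funext k
      simp [Nat.mul_succ]
    rw [h2, ih]
    rfl

theorem pvSlice0 {α : Type} (l : List α) :
    PySem.List.slice? l (some 0) none 2 = some (pvEvens l) := by
  rw [← pvFilterMap_range_evens]
  simp only [PySem.List.slice?, PySem.List.sliceIndices]
  norm_num
  have hcount : (if 0 < l.length then (((l.length : Int) + 2 - 1) / 2).toNat else 0)
      = (l.length + 1) / 2 := by split <;> omega
  have hidx : ∀ x : Nat, (2 * (x : Int)).toNat = 2 * x := by intro x; omega
  rw [hcount]
  simp only [hidx]

theorem pvSlice1 {α : Type} (l : List α) :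
    PySem.List.slice? l (some 1) none 2 = some (pvEvens l.tail) := by
  rw [← pvFilterMap_range_evens]
  simp only [PySem.List.slice?, PySem.List.sliceIndices]
  norm_num
  cases l with
  | nil => simp
  | cons a t =>
    have hcount : (if 1 < (a :: t).length then
        ((((a :: t).length : Int) - min 1 ((a :: t).length : Int) + 2 - 1) / 2).toNat else 0)
        = ((a :: t).length - 1 + 1) / 2 := by
      simp only [List.length_cons]; split <;> omega
    have hidx : ∀ x : Nat, (min 1 ((a :: t).length : Int) + 2 * (x : Int)).toNat = 2 * x + 1 := by
      intro x; simp only [List.length_cons]; omega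
    rw [hcount]
    simp only [hidx]

-- positions visited strictly after starting at p, following moves
def pvVisitedFrom (p : Int × Int) : List Char → List (Int × Int)
  | [] => []
  | m :: ms =>
    let d := (moveKey.get? m).getD (0, 0)
    (p.1 + d.1, p.2 + d.2) :: pvVisitedFrom (p.1 + d.1, p.2 + d.2) ms

theorem pvB_mem (ms : List Char) : ∀ (p : Int × Int) (S : PySem.Set (Int × Int)) (y : Int × Int),
    y ∈ (ms.foldl stepB (p, S)).2 ↔ y ∈ S ∨ y ∈ pvVisitedFrom p ms := by
  induction ms with
  | nil => intro p S y; simp [pvVisitedFrom]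
  | cons m ms ih =>
    intro p S y
    simp only [List.foldl_cons, stepB, pvVisitedFrom, ih, PySem.Set.mem_add, List.mem_cons]
    tauto

theorem pvB_nodup (ms : List Char) : ∀ (p : Int × Int) (S : PySem.Set (Int × Int)),
    S.Nodup → (ms.foldl stepB (p, S)).2.Nodup := by
  induction ms with
  | nil => intro p S h; exact h
  | cons m ms ih =>
    intro p S h
    simp only [List.foldl_cons, stepB]
    exact ih _ _ (PySem.Set.nodup_add _ _ h)

theorem pvA_mem (l : List Char) : ∀ (P Q : Int × Int) (S : PySem.Set (Int × Int)) (b : Bool)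
    (y : Int × Int),
    y ∈ (l.foldl stepA (P, Q, S, b)).2.2.1 ↔
      y ∈ S ∨ y ∈ pvVisitedFrom (if b then P else Q) (pvEvens l)
            ∨ y ∈ pvVisitedFrom (if b then Q else P) (pvEvens l.tail) := by
  induction l with
  | nil => intro P Q S b y; simp [pvEvens, pvVisitedFrom]
  | cons c t ih =>
    intro P Q S b y
    cases b with
    | true =>
      rw [List.foldl_cons, show stepA (P, Q, S, true) c =
        ((P.1 + ((moveKey.get? c).getD (0,0)).1, P.2 + ((moveKey.get? c).getD (0,0)).2), Q,
          PySem.Set.add S (P.1 + ((moveKey.get? c).getD (0,0)).1, P.2 + ((moveKey.get? c).getD (0,0)).2),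
          false) from rfl, ih]
      simp [pvEvens_cons, pvVisitedFrom, PySem.Set.mem_add]
      tauto
    | false =>
      rw [List.foldl_cons, show stepA (P, Q, S, false) c =
        (P, (Q.1 + ((moveKey.get? c).getD (0,0)).1, Q.2 + ((moveKey.get? c).getD (0,0)).2),
          PySem.Set.add S (Q.1 + ((moveKey.get? c).getD (0,0)).1, Q.2 + ((moveKey.get? c).getD (0,0)).2),
          true) from rfl, ih]
      simp [pvEvens_cons, pvVisitedFrom, PySem.Set.mem_add]
      tauto

theorem pvA_nodup (l : List Char) : ∀ (P Q : Int × Int) (S : PySem.Set (Int × Int)) (b : Bool),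
    S.Nodup → (l.foldl stepA (P, Q, S, b)).2.2.1.Nodup := by
  induction l with
  | nil => intro _ _ _ _ h; exact h
  | cons c t ih =>
    intro P Q S b h
    cases b <;> simp only [List.foldl_cons, stepA] <;>
      exact ih _ _ _ _ (PySem.Set.nodup_add _ _ h)

-- ===== VERDICT (by name: the statement is the Claim_ definition above) =====
theorem doubleParseLocation_spec : Claim_equal_doubleParseLocation := by
  intro directions _ _
  unfold Spec_doubleParseLocation doubleParseLocation doubleParseLocation_alt
  rw [pvSlice0, pvSlice1]
  simp only [Option.getD_some]
  have hAn : (directions.toList.foldl stepA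
      (((0, 0), (0, 0), PySem.Set.ofList [((0 : Int), (0 : Int))], true))).2.2.1.Nodup :=
    pvA_nodup _ _ _ _ _ (PySem.Set.nodup_ofList _)
  have hBn : (PySem.Set.union (visitedB (pvEvens directions.toList))
      (visitedB (pvEvens directions.toList.tail))).Nodup :=
    PySem.Set.nodup_union _ _ (pvB_nodup _ _ _ (PySem.Set.nodup_ofList _))
  have hmem : ∀ y, y ∈ (directions.toList.foldl stepA
      (((0, 0), (0, 0), PySem.Set.ofList [((0 : Int), (0 : Int))], true))).2.2.1 ↔
      y ∈ PySem.Set.union (visitedB (pvEvens directions.toList))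
        (visitedB (pvEvens directions.toList.tail)) := by
    intro y
    rw [pvA_mem, PySem.Set.mem_union]
    unfold visitedB
    rw [pvB_mem, pvB_mem]
    simp only [PySem.Set.mem_ofList, List.mem_singleton, if_true]
    tauto
  have hperm := (List.perm_ext_iff_of_nodup hAn hBn).mpr hmem
  simp only [PySem.Set.len]
  exact congrArg (fun n : Nat => (n : Int)) hperm.length_eq
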